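-- pv_equiv track=rewrite | github.com/vinadsa/ASA | Hackerrank 2/pyramid.py | piramida
-- ===== SOURCE A (Python) =====
-- def piramida(batu):
--     # Basis rekursif: jika hanya satu batu, kembalikan sebagai list berisi satu tingkat.
--     if len(batu) == 1:
--         return [batu]
--     else:
--         # Hitung tingkat berikutnya dengan menjumlahkan pasangan batu.
--         next_level = [batu[i] + batu[i+1] for i in range(len(batu)-1)]
--         # Panggil fungsi secara rekursif untuk mendapatkan piramida di atas tingkat ini.
--         piramida_atas = piramida(next_level)
--         # Tambahkan tingkat saat ini ke piramida.
--         piramida_atas.append(batu)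
--         return piramida_atas
-- ===== SOURCE B (Python) =====
-- def piramida(batu):
--     # Iterative bottom-up build: keep shrinking the current level and
--     # prepend each new level, so the apex ends up first and the base last.
--     levels = [batu]
--     current = batu
--     while len(current) > 1:
--         current = [x + y for x, y in zip(current, current[1:])]
--         levels.insert(0, current)
--     return levels
-- ===== Notes on version B (the rewrite author's own statement) =====
-- stated objective: simpler
-- what changed: Replaces A's recursion (build upper pyramid recursively, append the base afterwards) with a single iterative while-loop that prepends each pairwise-sum level to the result.
import Mathlib
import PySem

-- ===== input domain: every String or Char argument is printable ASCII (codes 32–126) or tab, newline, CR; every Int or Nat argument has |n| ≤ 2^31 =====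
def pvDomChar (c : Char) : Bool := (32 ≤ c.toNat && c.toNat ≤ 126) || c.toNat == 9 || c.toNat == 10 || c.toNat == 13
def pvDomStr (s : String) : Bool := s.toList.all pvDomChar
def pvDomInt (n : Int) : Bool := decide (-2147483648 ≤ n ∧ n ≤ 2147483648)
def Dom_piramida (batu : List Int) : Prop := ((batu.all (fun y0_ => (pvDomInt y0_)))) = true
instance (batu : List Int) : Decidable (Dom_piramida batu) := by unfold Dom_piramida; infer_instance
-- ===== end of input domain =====

-- B replaces A's recursion (recurse, then append the base) with a single iterative
-- loop that prepends each pairwise-sum level to the result (objective: simpler).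

-- ===== PORT A =====
-- Literal port of A's recursion. On [] the Python recurses forever (RecursionError);
-- the 'batu.length = 0' branch is a totality guard only, and [] is excluded by Pre_.
def piramida (batu : List Int) : List (List Int) :=
  if batu.length = 1 then [batu]
  else if batu.length = 0 then []
  else
    -- next_level = [batu[i] + batu[i+1] for i in range(len(batu)-1)]; both indices are
    -- always in range here, so pyGetD with default 0 is exact.
    let next_level := (PySem.List.pyRange 0 ((batu.length : Int) - 1) 1).map
      (fun i => PySem.List.pyGetD batu i 0 + PySem.List.pyGetD batu (i+1) 0)
    piramida next_level ++ [batu]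
termination_by batu.length
decreasing_by
  simp only [List.length_map, PySem.List.length_pyRange_one]
  omega

-- ===== PORT B =====
-- B's while-loop: shrink 'current' by pairwise sums (zip of the list with its tail),
-- prepending each new level to 'levels'.
def piramidaLoop (current : List Int) (levels : List (List Int)) : List (List Int) :=
  if 1 < current.length then
    let nxt := List.zipWith (· + ·) current (current.drop 1)
    piramidaLoop nxt (nxt :: levels)
  else levels
termination_by current.length
decreasing_by
  simp only [List.length_zipWith, List.length_drop]
  omega

def piramida_alt (batu : List Int) : List (List Int) :=
  piramidaLoop batu [batu]

-- ===== PRECONDITION & SPEC =====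
-- Pre_ excludes only the empty list, on which the Python A recurses without bound (RecursionError).
def Pre_piramida (batu : List Int) : Prop := batu ≠ []
instance (batu : List Int) : Decidable (Pre_piramida batu) := by unfold Pre_piramida; infer_instance
def pvWitness_piramida : List Int := ([1, 2, 3] : List Int)

def Spec_piramida (batu : List Int) (out : List (List Int)) : Prop := out = piramida_alt batu
instance (batu : List Int) (out : List (List Int)) : Decidable (Spec_piramida batu out) := by unfold Spec_piramida; infer_instance

-- ===== CLAIM (what is proved, stated in full; the proofs are below) =====
def Claim_equal_piramida : Prop := ∀ (batu : List Int), Dom_piramida batu → Pre_piramida batu → Spec_piramida batu (piramida batu)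

-- ===== LEMMAS AND PROOFS =====

-- A's index-comprehension computes exactly B's zipWith of adjacent elements.
lemma next_level_eq_zipWith (l : List Int) :
    (PySem.List.pyRange 0 ((l.length : Int) - 1) 1).map
      (fun i => PySem.List.pyGetD l i 0 + PySem.List.pyGetD l (i+1) 0)
      = List.zipWith (· + ·) l (l.drop 1) := by
  apply List.ext_getElem
  · simp [PySem.List.length_pyRange_one, List.length_zipWith]
  · intro i h1 h2
    simp only [List.getElem_map, PySem.List.getElem_pyRange_one, List.getElem_zipWith,
      List.getElem_drop]
    have hlen : i + 1 < l.length := by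
      simp [PySem.List.length_pyRange_one] at h1; omega
    rw [show ((0:Int) + i) = ((i : Nat) : Int) by ring]
    rw [PySem.List.pyGetD_natCast]
    rw [show ((i:Int) + 1) = (((i+1 : Nat)) : Int) by push_cast; ring]
    rw [PySem.List.pyGetD_natCast]
    simp [hlen, Nat.lt_of_succ_lt hlen]
    congr 1
    omega

-- Loop invariant: running B's loop from a nonempty level l with l already accumulated
-- produces A's pyramid of l followed by the accumulator.
lemma loop_eq (n : Nat) : ∀ (l : List Int), l.length ≤ n → l ≠ [] →
    ∀ acc, piramidaLoop l (l :: acc) = piramida l ++ acc := by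
  induction n with
  | zero => intro l h hne; cases l <;> simp_all
  | succ n ih =>
    intro l h hne acc
    rw [piramidaLoop, piramida]
    by_cases h1 : l.length = 1
    · simp [h1]
    · have h2 : 1 < l.length := by
        cases l with
        | nil => exact absurd rfl hne
        | cons a t => simp only [List.length_cons] at h1 ⊢; omega
      rw [if_pos h2, if_neg h1, if_neg (show ¬ l.length = 0 by omega)]
      rw [next_level_eq_zipWith]
      have hlen : (List.zipWith (· + ·) l (l.drop 1)).length = l.length - 1 := by
        simp [List.length_zipWith]
      rw [ih _ (by omega) (by intro hc; rw [hc] at hlen; simp at hlen; omega)]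
      simp

-- ===== VERDICT (by name: the statement is the Claim_ definition above) =====
theorem piramida_spec : Claim_equal_piramida := by
  intro batu _ hpre
  unfold Spec_piramida piramida_alt
  exact (by simpa using (loop_eq batu.length batu le_rfl hpre []).symm)
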